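-- pv_equiv track=rewrite | github.com/HanseulJo/position-coupling | src/data/addition.py | generate_long_scratchpad
-- ===== SOURCE A (Python) =====
-- def get_interleave_sum(a,b):
--     interleave = ""
--     max_len = max(len(str(a)), len(str(b)))
--     for i, (ai, bi) in enumerate(zip(f"{a:0{max_len}d}"[::-1], f"{b:0{max_len}d}"[::-1])):
--         interleave += f"{ai}+{bi},"
--     return interleave[:-1] # eliminate last ','
--
-- def generate_long_scratchpad(a, b, reverse=True):
--     scratchpad = get_interleave_sum(a, b) + '='
--     scratch = []
--     max_len = max(len(str(a)), len(str(b)))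
--     for ai, bi in zip(f"{a:0{max_len}d}", f"{b:0{max_len}d}"):
--         ai, bi = int(ai), int(bi)
--         scratch.append(ai+bi)
--     for i in range(1, max_len):
--         for j, num in enumerate(scratch[::-1]):
--             scratchpad += f"{num:02d}"[::-1] if reverse else f"{num:02d}"
--             scratchpad += "," if j < len(scratch)-1 else ':'
--         a = scratch.pop()
--         b = scratch.pop()
--         scratch.append(a+b*10**i)
--     return scratchpad
-- ===== SOURCE B (Python) =====
-- def generate_long_scratchpad(a, b, reverse=True):
--     max_len = max(len(str(a)), len(str(b)))
--     sa, sb = str(a).zfill(max_len), str(b).zfill(max_len)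
--     prefix = ",".join(f"{x}+{y}" for x, y in zip(reversed(sa), reversed(sb))) + "="
--     scratch = [int(x) + int(y) for x, y in zip(sa, sb)]
--     pieces = [prefix]
--     acc = scratch[-1]
--     for i in range(1, max_len):
--         row = scratch[:max_len - i] + [acc]
--         cells = (f"{n:02d}"[::-1] if reverse else f"{n:02d}" for n in reversed(row))
--         pieces.append(",".join(cells) + ":")
--         acc += scratch[max_len - 1 - i] * 10 ** i
--     return "".join(pieces)
-- ===== Notes on version B (the rewrite author's own statement) =====
-- stated objective: alternative
-- what changed: B replaces A's destructive pop/pop/append stack mutation of scratch by an immutable scratch list plus a running integer accumulator (each row is scratch[:max_len-i] + [acc]), and builds the interleave prefix and each row with ','.join instead of repeated string concatenation and a trailing-comma strip.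
import Mathlib
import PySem

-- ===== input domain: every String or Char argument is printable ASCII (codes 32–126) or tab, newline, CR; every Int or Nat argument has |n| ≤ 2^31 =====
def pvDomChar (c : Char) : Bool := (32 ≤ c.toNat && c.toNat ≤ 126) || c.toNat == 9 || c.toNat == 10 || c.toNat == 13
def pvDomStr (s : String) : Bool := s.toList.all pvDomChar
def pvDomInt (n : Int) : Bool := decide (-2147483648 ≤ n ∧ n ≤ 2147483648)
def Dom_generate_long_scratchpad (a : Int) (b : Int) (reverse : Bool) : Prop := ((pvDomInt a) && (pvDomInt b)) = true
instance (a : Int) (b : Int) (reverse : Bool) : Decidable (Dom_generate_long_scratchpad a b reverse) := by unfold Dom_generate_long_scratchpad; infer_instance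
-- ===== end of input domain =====

-- B replaces A's pop/push stack mutation by a running integer accumulator and builds
-- each line and the interleave prefix with joins instead of repeated string concatenation
-- (objective: alternative decomposition, same cost).

-- shared formatting helpers (Python f-string builtins; exact for the nonnegative ints Pre_ admits)
-- f"{n:0{w}d}" for n ≥ 0 (str(n) zero-padded to width w)
def pvPad (n : Int) (w : Nat) : List Char :=
  let s := PySem.Int.toChars n
  List.replicate (w - s.length) '0' ++ s
-- int(c) for a single digit character c
def pvDigit (c : Char) : Int := (c.toNat : Int) - 48
-- f"{n:02d}" for n ≥ 0
def pvFmt02 (n : Int) : List Char :=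
  let s := PySem.Int.toChars n
  List.replicate (2 - s.length) '0' ++ s

-- ===== PORT A =====
def get_interleave_sum (a : Int) (b : Int) : List Char :=
  let max_len := max (PySem.Int.toChars a).length (PySem.Int.toChars b).length
  let interleave := (List.zip (pvPad a max_len).reverse (pvPad b max_len).reverse).foldl
      (fun acc p => acc ++ [p.1, '+', p.2, ',']) []
  interleave.dropLast  -- interleave[:-1]

-- inner loop: for j, num in enumerate(scratch[::-1]): …
def pvInnerA (reverse : Bool) (scratch : List Int) (pad : List Char) : List Char :=
  (PySem.List.enumerate scratch.reverse 0).foldl (fun pad jn =>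
      (pad ++ (if reverse then (pvFmt02 jn.2).reverse else pvFmt02 jn.2)) ++
        [if jn.1 < PySem.List.len scratch - 1 then ',' else ':']) pad

-- body of `for i in range(1, max_len)`; getLast?.getD totalizes Python's pop()
-- (IndexError on empty, unreachable under Pre_)
def pvStepA (reverse : Bool) (st : List Char × List Int) (i : Nat) : List Char × List Int :=
  let pad := pvInnerA reverse st.2 st.1
  let av := st.2.getLast?.getD 0
  let s1 := st.2.dropLast
  let bv := s1.getLast?.getD 0
  (pad, s1.dropLast ++ [av + bv * 10 ^ i])

def generate_long_scratchpad (a : Int) (b : Int) (reverse : Bool) : String :=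
  let scratchpad := get_interleave_sum a b ++ ['=']
  let max_len := max (PySem.Int.toChars a).length (PySem.Int.toChars b).length
  let scratch := (List.zip (pvPad a max_len) (pvPad b max_len)).foldl
      (fun s p => s ++ [pvDigit p.1 + pvDigit p.2]) []
  String.ofList ((List.range' 1 (max_len - 1)).foldl (pvStepA reverse) (scratchpad, scratch)).1

-- ===== PORT B =====
-- f"{n:02d}"[::-1] if reverse else f"{n:02d}"
def pvCell (reverse : Bool) (n : Int) : List Char :=
  if reverse then (pvFmt02 n).reverse else pvFmt02 n

-- body of B's loop: emit one joined row from the immutable scratch and the accumulator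
def pvStepB (reverse : Bool) (scratch : List Int) (max_len : Nat) (st : List Char × Int) (i : Nat) : List Char × Int :=
  let row := (scratch.take (max_len - i) ++ [st.2]).reverse
  (st.1 ++ List.intercalate [','] (row.map (pvCell reverse)) ++ [':'],
   st.2 + scratch.getD (max_len - 1 - i) 0 * 10 ^ i)

def generate_long_scratchpad_alt (a : Int) (b : Int) (reverse : Bool) : String :=
  let max_len := max (PySem.Int.toChars a).length (PySem.Int.toChars b).length
  let sa := pvPad a max_len
  let sb := pvPad b max_len
  let pre := (List.intercalate [','] ((List.zip sa.reverse sb.reverse).map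
      (fun p => [p.1, '+', p.2]))) ++ ['=']
  let scratch := (List.zip sa sb).map (fun p => pvDigit p.1 + pvDigit p.2)
  -- scratch[-1]; getD totalizes (IndexError unreachable under Pre_)
  String.ofList ((List.range' 1 (max_len - 1)).foldl (pvStepB reverse scratch max_len)
      (pre, scratch.getLast?.getD 0)).1

-- ===== PRECONDITION & SPEC =====
-- Pre_ excludes negative a or b, on which A raises ValueError (int('-') on the sign character).
def Pre_generate_long_scratchpad (a : Int) (b : Int) (reverse : Bool) : Prop := 0 ≤ a ∧ 0 ≤ b
instance (a : Int) (b : Int) (reverse : Bool) : Decidable (Pre_generate_long_scratchpad a b reverse) := by unfold Pre_generate_long_scratchpad; infer_instance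
def pvWitness_generate_long_scratchpad : Int × Int × Bool := (123, 45, true)

def Spec_generate_long_scratchpad (a : Int) (b : Int) (reverse : Bool) (out : String) : Prop := out = generate_long_scratchpad_alt a b reverse
instance (a : Int) (b : Int) (reverse : Bool) (out : String) : Decidable (Spec_generate_long_scratchpad a b reverse out) := by unfold Spec_generate_long_scratchpad; infer_instance

-- ===== CLAIM (what is proved, stated in full; the proofs are below) =====
def Claim_equal_generate_long_scratchpad : Prop := ∀ (a : Int) (b : Int) (reverse : Bool), Dom_generate_long_scratchpad a b reverse → Pre_generate_long_scratchpad a b reverse → Spec_generate_long_scratchpad a b reverse (generate_long_scratchpad a b reverse)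

-- ===== LEMMAS AND PROOFS =====

lemma pvPrefixAux (ps : List (Char × Char)) :
    (ps.flatMap (fun p => [p.1, '+', p.2, ','])).dropLast
      = List.intercalate [','] (ps.map (fun p => [p.1, '+', p.2])) := by
  induction ps with
  | nil => simp [List.intercalate]
  | cons p t ih =>
    cases t with
    | nil => simp [List.intercalate]
    | cons q t' =>
      have hne : ((q :: t').flatMap (fun p => [p.1, '+', p.2, ','])) ≠ [] := by simp
      rw [List.flatMap_cons, List.dropLast_append_of_ne_nil hne, ih]
      simp [List.intercalate]

lemma pvPrefix_eq (ps : List (Char × Char)) :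
    (ps.foldl (fun acc p => acc ++ [p.1, '+', p.2, ',']) []).dropLast
      = List.intercalate [','] (ps.map (fun p => [p.1, '+', p.2])) := by
  rw [PySem.List.foldl_append_eq_flatMap]
  simpa using pvPrefixAux ps

lemma pvInnerAux (f : Int → List Char) (L : Int) :
    ∀ (l : List Int) (s : Int) (pad : List Char), l ≠ [] → s + l.length = L →
    (PySem.List.enumerate l s).foldl (fun pad jn =>
        (pad ++ f jn.2) ++ [if jn.1 < L - 1 then ',' else ':']) pad
      = pad ++ List.intercalate [','] (l.map f) ++ [':'] := by
  intro l
  induction l with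
  | nil => intro s pad h _; exact absurd rfl h
  | cons x xs ih =>
    intro s pad _ hlen
    cases xs with
    | nil =>
      simp only [List.length_cons, List.length_nil] at hlen
      rw [PySem.List.enumerate_cons, PySem.List.enumerate_nil]
      simp only [List.foldl_cons, List.foldl_nil]
      rw [if_neg (by omega)]
      simp [List.intercalate]
    | cons y t =>
      have hlt : s < L - 1 := by
        simp only [List.length_cons] at hlen; push_cast at hlen; omega
      rw [PySem.List.enumerate_cons]
      simp only [List.foldl_cons]
      rw [if_pos hlt, ih (s + 1) _ (by simp) (by simp only [List.length_cons] at hlen ⊢; push_cast at hlen ⊢; omega)]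
      simp [List.intercalate]

lemma pvInnerA_eq (reverse : Bool) (scratch : List Int) (pad : List Char) (h : scratch ≠ []) :
    pvInnerA reverse scratch pad
      = pad ++ List.intercalate [','] (scratch.reverse.map (pvCell reverse)) ++ [':'] := by
  exact pvInnerAux (pvCell reverse) (PySem.List.len scratch) scratch.reverse 0 pad
    (by simpa using h) (by simp [PySem.List.len_eq])

lemma pvTake_decomp (orig : List Int) (m : Nat) (h1 : 1 ≤ m) (h2 : m ≤ orig.length) :
    orig.take m = orig.take (m - 1) ++ [orig.getD (m - 1) 0] := by
  have hm1 : m - 1 < orig.length := by omega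
  conv_lhs => rw [show m = (m - 1) + 1 by omega, List.take_add_one]
  rw [List.getElem?_eq_getElem hm1, List.getD_eq_getElem orig 0 hm1]
  simp

lemma pvOuter_eq (reverse : Bool) (orig : List Int) (n : Nat) (hn : orig.length = n) :
    ∀ (k s : Nat) (acc : Int) (pad : List Char), 1 ≤ s → s + k = n →
    ((List.range' s k).foldl (pvStepA reverse) (pad, orig.take (n - s) ++ [acc])).1
      = ((List.range' s k).foldl (pvStepB reverse orig n) (pad, acc)).1 := by
  subst hn
  intro k
  induction k with
  | zero => intro s acc pad _ _; simp
  | succ k ih =>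
    intro s acc pad hs hlen
    have hm : 1 ≤ orig.length - s := by omega
    have hm2 : orig.length - s ≤ orig.length := by omega
    have hdec := pvTake_decomp orig (orig.length - s) hm hm2
    have hidx : orig.length - s - 1 = orig.length - 1 - s := by omega
    have e1 : pvStepA reverse (pad, orig.take (orig.length - s) ++ [acc]) s
        = (pad ++ List.intercalate [','] (((orig.take (orig.length - s) ++ [acc]).reverse).map (pvCell reverse)) ++ [':'],
           orig.take (orig.length - (s + 1)) ++ [acc + orig.getD (orig.length - 1 - s) 0 * 10 ^ s]) := by
      unfold pvStepA
      rw [pvInnerA_eq reverse _ pad (by simp)]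
      simp only [List.getLast?_concat, List.dropLast_concat, Option.getD_some]
      rw [hdec]
      simp only [List.getLast?_concat, List.dropLast_concat, Option.getD_some]
      simp only [hidx, show orig.length - (s + 1) = orig.length - 1 - s from by omega]
    have e2 : pvStepB reverse orig orig.length (pad, acc) s
        = (pad ++ List.intercalate [','] (((orig.take (orig.length - s) ++ [acc]).reverse).map (pvCell reverse)) ++ [':'],
           acc + orig.getD (orig.length - 1 - s) 0 * 10 ^ s) := by
      unfold pvStepB
      simp
    rw [List.range'_succ]
    simp only [List.foldl_cons]
    rw [e1, e2]
    exact ih (s + 1) _ _ (by omega) (by omega)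

lemma pvLen_pvPad (v : Int) (w : Nat) (h : (PySem.Int.toChars v).length ≤ w) :
    (pvPad v w).length = w := by
  unfold pvPad
  simp only [List.length_append, List.length_replicate]
  omega

-- ===== VERDICT (by name: the statement is the Claim_ definition above) =====
theorem generate_long_scratchpad_spec : Claim_equal_generate_long_scratchpad := by
  intro a b reverse _ _
  unfold Spec_generate_long_scratchpad generate_long_scratchpad generate_long_scratchpad_alt
  simp only []
  congr 1
  rw [PySem.List.foldl_append_singleton_eq_map, List.nil_append]
  set w := max (PySem.Int.toChars a).length (PySem.Int.toChars b).length with hw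
  set orig := (List.zip (pvPad a w) (pvPad b w)).map (fun p => pvDigit p.1 + pvDigit p.2) with horig
  have hpre : get_interleave_sum a b ++ ['='] =
      List.intercalate [','] ((List.zip (pvPad a w).reverse (pvPad b w).reverse).map
        (fun p => [p.1, '+', p.2])) ++ ['='] := by
    unfold get_interleave_sum
    rw [← hw, pvPrefix_eq]
  have hlen : orig.length = w := by
    rw [horig]
    simp only [List.length_map, List.length_zip]
    rw [pvLen_pvPad a w (Nat.le_max_left _ _), pvLen_pvPad b w (Nat.le_max_right _ _)]
    exact Nat.min_self w
  rcases Nat.eq_zero_or_pos w with hw0 | hw1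
  · rw [show w - 1 = 0 by omega]
    simp only [List.range'_zero, List.foldl_nil]
    rw [hpre]
  · have hsplit : orig = orig.take (w - 1) ++ [orig.getLast?.getD 0] := by
      have h := pvTake_decomp orig w hw1 (by omega)
      rw [List.take_of_length_le (le_of_eq hlen)] at h
      have hg : orig.getLast?.getD 0 = orig.getD (w - 1) 0 := by
        conv_lhs => rw [h]
        rw [List.getLast?_concat]
        rfl
      rw [hg]
      exact h
    rw [hpre]
    conv_lhs => rw [hsplit]
    exact pvOuter_eq reverse orig w hlen (w - 1) 1 (orig.getLast?.getD 0) _ le_rfl (by omega)
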